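-- pv_equiv track=rewrite | github.com/oliverjmfeix-sketch/ValenceV3 | app/services/projection_rule_executor.py | order_rule_ids
-- ===== SOURCE A (Python) =====
-- def order_rule_ids(rule_ids: list[str]) -> list[str]:
--     """Return rule IDs in execution order:
--       1. Mapping-derived rules (basket-level — entity_type, blocker, etc.)
--       2. b_aggregate (rule_conv_builder_b_aggregate) — must run before
--          sub-sources whose contributes_to references it
--       3. Builder sub-source rules (rule_conv_builder_builder_source_*)
--       4. Defeater rules (rule_conv_*_defeater) — must run after the
--          jcrew_blocker rule emits its prohibition norm
--     """
--     mapping = []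
--     b_agg = []
--     sub_source = []
--     defeaters = []
--     other = []
--     for rid in rule_ids:
--         if rid == "rule_conv_builder_b_aggregate":
--             b_agg.append(rid)
--         elif rid.startswith("rule_conv_builder_builder_source_"):
--             sub_source.append(rid)
--         elif rid.endswith("_defeater"):
--             defeaters.append(rid)
--         elif rid.startswith("rule_conv_"):
--             mapping.append(rid)
--         else:
--             # Unrecognized prefix — append at end so it doesn't break the
--             # builder ordering. Reachable when a future rule kind lands.
--             other.append(rid)
--     return mapping + b_agg + sub_source + defeaters + other
-- ===== SOURCE B (Python) =====
-- def _priority(rid: str) -> int: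
--     # Check predicates in A's classification order; return the OUTPUT-order rank.
--     if rid == "rule_conv_builder_b_aggregate":
--         return 1
--     if rid.startswith("rule_conv_builder_builder_source_"):
--         return 2
--     if rid.endswith("_defeater"):
--         return 3
--     if rid.startswith("rule_conv_"):
--         return 0
--     return 4
--
--
-- def order_rule_ids(rule_ids: list[str]) -> list[str]:
--     # Stable sort keeps the original relative order inside each priority bucket.
--     return sorted(rule_ids, key=_priority)
-- ===== Notes on version B (the rewrite author's own statement) =====
-- stated objective: idiomatic
-- what changed: Replaces the five explicit accumulator lists and final concatenation with a priority-key function plus a single stable sorted() call.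
import Mathlib
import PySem

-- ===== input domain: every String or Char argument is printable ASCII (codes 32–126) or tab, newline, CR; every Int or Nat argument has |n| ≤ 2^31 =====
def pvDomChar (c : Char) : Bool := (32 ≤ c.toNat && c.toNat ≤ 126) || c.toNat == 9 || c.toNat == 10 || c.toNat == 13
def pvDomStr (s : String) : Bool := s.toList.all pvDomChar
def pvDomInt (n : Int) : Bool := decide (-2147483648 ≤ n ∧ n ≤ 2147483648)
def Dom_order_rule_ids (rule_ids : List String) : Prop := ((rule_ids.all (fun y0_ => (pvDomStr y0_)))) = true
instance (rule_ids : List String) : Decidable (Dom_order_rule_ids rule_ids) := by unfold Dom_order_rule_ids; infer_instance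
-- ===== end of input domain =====

-- B replaces A's five accumulator lists and final concatenation by a priority key
-- plus one stable sort (idiomatic; same result, not claimed faster).

-- ===== PORT A =====
-- A: one pass, five bucket accumulators, concatenated at the end.
def pvStepA (st : List String × List String × List String × List String × List String)
    (rid : String) : List String × List String × List String × List String × List String :=
  let (mapping, b_agg, sub_source, defeaters, other) := st
  if rid == "rule_conv_builder_b_aggregate" then
    (mapping, b_agg ++ [rid], sub_source, defeaters, other)
  else if PySem.Str.startswith rid "rule_conv_builder_builder_source_" then
    (mapping, b_agg, sub_source ++ [rid], defeaters, other)
  else if PySem.Str.endswith rid "_defeater" then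
    (mapping, b_agg, sub_source, defeaters ++ [rid], other)
  else if PySem.Str.startswith rid "rule_conv_" then
    (mapping ++ [rid], b_agg, sub_source, defeaters, other)
  else
    (mapping, b_agg, sub_source, defeaters, other ++ [rid])

def order_rule_ids (rule_ids : List String) : List String :=
  let st := rule_ids.foldl pvStepA ([], [], [], [], [])
  st.1 ++ st.2.1 ++ st.2.2.1 ++ st.2.2.2.1 ++ st.2.2.2.2

-- ===== PORT B =====
-- B: priority key (predicates in A's classification order, output-order rank) + one stable sort.
def pvPriority (rid : String) : Int :=
  if rid == "rule_conv_builder_b_aggregate" then 1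
  else if PySem.Str.startswith rid "rule_conv_builder_builder_source_" then 2
  else if PySem.Str.endswith rid "_defeater" then 3
  else if PySem.Str.startswith rid "rule_conv_" then 0
  else 4

def order_rule_ids_alt (rule_ids : List String) : List String :=
  PySem.List.sorted rule_ids pvPriority

-- ===== PRECONDITION & SPEC =====
def Spec_order_rule_ids (rule_ids : List String) (out : List String) : Prop := out = order_rule_ids_alt rule_ids
instance (rule_ids : List String) (out : List String) : Decidable (Spec_order_rule_ids rule_ids out) := by unfold Spec_order_rule_ids; infer_instance

-- ===== CLAIM (what is proved, stated in full; the proofs are below) =====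
def Claim_equal_order_rule_ids : Prop := ∀ (rule_ids : List String), Dom_order_rule_ids rule_ids → Spec_order_rule_ids rule_ids (order_rule_ids rule_ids)

-- ===== LEMMAS AND PROOFS =====

def pvBucket (i : Int) (xs : List String) : List String :=
  xs.filter (fun r => pvPriority r == i)

def pvConcat (xs : List String) : List String :=
  pvBucket 0 xs ++ pvBucket 1 xs ++ pvBucket 2 xs ++ pvBucket 3 xs ++ pvBucket 4 xs

lemma mem_pvBucket {i : Int} {xs : List String} {y : String}
    (h : y ∈ pvBucket i xs) : pvPriority y = i := by
  simp [pvBucket, List.mem_filter] at h; exact h.2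

lemma pvPriority_le_four (r : String) : pvPriority r ≤ 4 := by
  unfold pvPriority; split_ifs <;> norm_num

lemma pvPriority_nonneg (r : String) : 0 ≤ pvPriority r := by
  unfold pvPriority; split_ifs <;> norm_num

lemma insertBy_skip {α : Type} (before : α → α → Bool) (x : α) (l1 l2 : List α)
    (h : ∀ y ∈ l1, before x y = false) :
    PySem.List.insertBy before x (l1 ++ l2) = l1 ++ PySem.List.insertBy before x l2 := by
  induction l1 with
  | nil => simp
  | cons a l ih =>
    have ha : before x a = false := h a (by simp)
    simp [PySem.List.insertBy, ha, ih (fun y hy => h y (by simp [hy]))]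

lemma insertBy_front {α : Type} (before : α → α → Bool) (x : α) (l : List α)
    (h : ∀ y ∈ l, before x y = true) :
    PySem.List.insertBy before x l = x :: l := by
  cases l with
  | nil => simp [PySem.List.insertBy]
  | cons a l => simp [PySem.List.insertBy, h a (by simp)]

lemma pvBucket_append (i : Int) (xs : List String) (x : String) :
    pvBucket i (xs ++ [x]) =
      pvBucket i xs ++ (if pvPriority x == i then [x] else []) := by
  unfold pvBucket
  rw [List.filter_append]
  cases hb : pvPriority x == i <;> simp [List.filter, hb]

lemma insertBy_pvConcat (xs : List String) (x : String) :
    PySem.List.insertBy (fun a b => decide (pvPriority a < pvPriority b)) x (pvConcat xs)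
      = pvConcat (xs ++ [x]) := by
  have h0 := pvPriority_nonneg x
  have h4 := pvPriority_le_four x
  interval_cases h : pvPriority x
  · -- priority 0: goes before buckets 1..4
    have hfront : ∀ y ∈ pvBucket 1 xs ++ (pvBucket 2 xs ++ (pvBucket 3 xs ++ pvBucket 4 xs)),
        (decide (pvPriority x < pvPriority y) : Bool) = true := by
      intro y hy; simp only [List.mem_append] at hy
      rcases hy with hy | hy | hy | hy <;>
        simp [h, mem_pvBucket hy]
    have hskip : ∀ y ∈ pvBucket 0 xs,
        (decide (pvPriority x < pvPriority y) : Bool) = false := by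
      intro y hy; simp [h, mem_pvBucket hy]
    rw [show pvConcat xs = pvBucket 0 xs ++ (pvBucket 1 xs ++ (pvBucket 2 xs ++ (pvBucket 3 xs ++ pvBucket 4 xs))) from by
      simp [pvConcat]]
    rw [insertBy_skip _ _ _ _ hskip, insertBy_front _ _ _ hfront]
    simp [pvConcat, pvBucket_append, h]
  · have hfront : ∀ y ∈ pvBucket 2 xs ++ (pvBucket 3 xs ++ pvBucket 4 xs),
        (decide (pvPriority x < pvPriority y) : Bool) = true := by
      intro y hy; simp only [List.mem_append] at hy
      rcases hy with hy | hy | hy <;> simp [h, mem_pvBucket hy]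
    have hskip : ∀ y ∈ pvBucket 0 xs ++ pvBucket 1 xs,
        (decide (pvPriority x < pvPriority y) : Bool) = false := by
      intro y hy; simp only [List.mem_append] at hy
      rcases hy with hy | hy <;> simp [h, mem_pvBucket hy]
    rw [show pvConcat xs = (pvBucket 0 xs ++ pvBucket 1 xs) ++ (pvBucket 2 xs ++ (pvBucket 3 xs ++ pvBucket 4 xs)) from by
      simp [pvConcat]]
    rw [insertBy_skip _ _ _ _ hskip, insertBy_front _ _ _ hfront]
    simp [pvConcat, pvBucket_append, h]
  · have hfront : ∀ y ∈ pvBucket 3 xs ++ pvBucket 4 xs,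
        (decide (pvPriority x < pvPriority y) : Bool) = true := by
      intro y hy; simp only [List.mem_append] at hy
      rcases hy with hy | hy <;> simp [h, mem_pvBucket hy]
    have hskip : ∀ y ∈ pvBucket 0 xs ++ pvBucket 1 xs ++ pvBucket 2 xs,
        (decide (pvPriority x < pvPriority y) : Bool) = false := by
      intro y hy; simp only [List.mem_append] at hy
      rcases hy with (hy | hy) | hy <;> simp [h, mem_pvBucket hy]
    rw [show pvConcat xs = (pvBucket 0 xs ++ pvBucket 1 xs ++ pvBucket 2 xs) ++ (pvBucket 3 xs ++ pvBucket 4 xs) from by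
      simp [pvConcat]]
    rw [insertBy_skip _ _ _ _ hskip, insertBy_front _ _ _ hfront]
    simp [pvConcat, pvBucket_append, h]
  · have hfront : ∀ y ∈ pvBucket 4 xs,
        (decide (pvPriority x < pvPriority y) : Bool) = true := by
      intro y hy; simp [h, mem_pvBucket hy]
    have hskip : ∀ y ∈ pvBucket 0 xs ++ pvBucket 1 xs ++ pvBucket 2 xs ++ pvBucket 3 xs,
        (decide (pvPriority x < pvPriority y) : Bool) = false := by
      intro y hy; simp only [List.mem_append] at hy
      rcases hy with ((hy | hy) | hy) | hy <;> simp [h, mem_pvBucket hy]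
    rw [show pvConcat xs = (pvBucket 0 xs ++ pvBucket 1 xs ++ pvBucket 2 xs ++ pvBucket 3 xs) ++ pvBucket 4 xs from by
      simp [pvConcat]]
    rw [insertBy_skip _ _ _ _ hskip, insertBy_front _ _ _ hfront]
    simp [pvConcat, pvBucket_append, h]
  · have hskip : ∀ y ∈ pvConcat xs,
        (decide (pvPriority x < pvPriority y) : Bool) = false := by
      intro y hy; simp only [pvConcat, List.mem_append] at hy
      rcases hy with (((hy | hy) | hy) | hy) | hy <;> simp [h, mem_pvBucket hy]
    rw [show pvConcat xs = pvConcat xs ++ [] from by simp]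
    rw [insertBy_skip _ _ _ _ hskip]
    simp [pvConcat, pvBucket_append, h, PySem.List.insertBy]

lemma sorted_eq_pvConcat (xs : List String) :
    PySem.List.sorted xs pvPriority = pvConcat xs := by
  rw [PySem.List.sorted_eq_foldl_insertBy]
  induction xs using List.reverseRecOn with
  | nil => simp [pvConcat, pvBucket]
  | append_singleton xs x ih =>
    rw [List.foldl_append, List.foldl_cons, List.foldl_nil, ih, insertBy_pvConcat]

lemma foldl_pvStepA (xs : List String) :
    ∀ m b s d o : List String,
      xs.foldl pvStepA (m, b, s, d, o) =
        (m ++ pvBucket 0 xs, b ++ pvBucket 1 xs, s ++ pvBucket 2 xs,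
         d ++ pvBucket 3 xs, o ++ pvBucket 4 xs) := by
  induction xs with
  | nil => intro m b s d o; simp [pvBucket]
  | cons x xs ih =>
    intro m b s d o
    rw [List.foldl_cons]
    by_cases h1 : x = "rule_conv_builder_b_aggregate"
    · simp [pvStepA, h1, ih, pvBucket, pvPriority, beq_iff_eq]
    · by_cases h2 : PySem.Str.startswith x "rule_conv_builder_builder_source_" = true
      all_goals simp [PySem.Str.startswith] at h2
      · simp [pvStepA, h1, h2, ih, pvBucket, pvPriority, PySem.Str.startswith, beq_iff_eq]
      · by_cases h3 : PySem.Str.endswith x "_defeater" = true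
        all_goals simp [PySem.Str.endswith] at h3
        · simp [pvStepA, h1, h2, h3, ih, pvBucket, pvPriority, PySem.Str.startswith, PySem.Str.endswith, beq_iff_eq]
        · by_cases h4 : PySem.Str.startswith x "rule_conv_" = true
          all_goals simp [PySem.Str.startswith] at h4
          · simp [pvStepA, h1, h2, h3, h4, ih, pvBucket, pvPriority, PySem.Str.startswith, PySem.Str.endswith, beq_iff_eq]
          · simp [pvStepA, h1, h2, h3, h4, ih, pvBucket, pvPriority, PySem.Str.startswith, PySem.Str.endswith, beq_iff_eq]

-- ===== VERDICT (by name: the statement is the Claim_ definition above) =====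
theorem order_rule_ids_spec : Claim_equal_order_rule_ids := by
  intro rule_ids _
  show order_rule_ids rule_ids = order_rule_ids_alt rule_ids
  rw [order_rule_ids, order_rule_ids_alt, sorted_eq_pvConcat, foldl_pvStepA]
  simp [pvConcat]
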